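-- pv_equiv track=rewrite | github.com/shadaabsiddiqie/EfficientDummyGeneration | CDG.py | sectorWidth
-- ===== SOURCE A (Python) =====
-- def sectorWidth(edgeSectors,ValidPosInSectors):
--     secWidth = []
--     for s in ValidPosInSectors.keys():
--         distMaxX = 0
--         distMaxY = 0
--         distMax = 0
--         for p in ValidPosInSectors[s]:
--             #should change n value down
--             distMaxX = max(abs(edgeSectors[s][0]-p[0]),distMaxX)
--             distMaxY = max(abs(edgeSectors[s][1]-p[1]),distMaxY)
--             distMax = max(distMax,max(distMaxX,distMaxY))
--         secWidth.append(distMax)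
--     return secWidth
-- ===== SOURCE B (Python) =====
-- def sectorWidth(edgeSectors, ValidPosInSectors):
--     # Different algorithm: instead of taking a running max of |edge - p| per point,
--     # reduce each sector's points to their coordinate extrema (min/max of x and y)
--     # and derive the answer in closed form: max |e - x| over a nonempty set equals
--     # max(e - min(xs), max(xs) - e).  Empty sectors give 0 as in A.
--     out = []
--     for s, pts in ValidPosInSectors.items():
--         if not pts:
--             out.append(0)
--             continue
--         ex, ey = edgeSectors[s][0], edgeSectors[s][1]
--         xs = [p[0] for p in pts]
--         ys = [p[1] for p in pts]
--         out.append(max(ex - min(xs), max(xs) - ex, ey - min(ys), max(ys) - ey))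
--     return out
-- ===== Notes on version B (the rewrite author's own statement) =====
-- stated objective: alternative
-- what changed: B replaces A's per-point running max of Chebyshev deviations with a reduction of each sector's points to their coordinate extrema (min/max of x and y) followed by the closed form max(ex-minX, maxX-ex, ey-minY, maxY-ey).
import Mathlib
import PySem

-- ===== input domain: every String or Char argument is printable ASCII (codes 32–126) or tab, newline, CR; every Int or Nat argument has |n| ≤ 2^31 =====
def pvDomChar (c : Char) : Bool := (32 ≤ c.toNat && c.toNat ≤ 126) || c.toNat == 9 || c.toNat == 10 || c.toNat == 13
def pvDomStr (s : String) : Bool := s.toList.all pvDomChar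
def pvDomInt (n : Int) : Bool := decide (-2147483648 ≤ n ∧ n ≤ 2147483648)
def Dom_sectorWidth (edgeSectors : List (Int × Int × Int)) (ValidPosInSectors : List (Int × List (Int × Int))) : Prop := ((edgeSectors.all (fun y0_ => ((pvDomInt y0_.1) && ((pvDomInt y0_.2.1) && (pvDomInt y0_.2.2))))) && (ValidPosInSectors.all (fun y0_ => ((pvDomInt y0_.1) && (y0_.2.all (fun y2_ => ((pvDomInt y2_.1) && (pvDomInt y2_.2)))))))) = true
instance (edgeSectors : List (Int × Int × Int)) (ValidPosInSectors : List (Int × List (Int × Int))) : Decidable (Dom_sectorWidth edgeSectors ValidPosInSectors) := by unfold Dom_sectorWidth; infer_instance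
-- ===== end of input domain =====

-- B replaces A's per-point running max of |edge-p| by reducing each sector's points to their
-- coordinate extrema and a closed form max(ex-minX, maxX-ex, ey-minY, maxY-ey) (objective: alternative).

-- ===== PORT A =====
def sectorWidth (edgeSectors : List (Int × Int × Int)) (ValidPosInSectors : List (Int × List (Int × Int))) : List Int :=
  let ed := PySem.Dict.ofList edgeSectors
  let d := PySem.Dict.ofList ValidPosInSectors
  d.keys.foldl (fun secWidth s =>
    let st := (d.getD s []).foldl
      (fun (st : Int × Int × Int) p =>
        let distMaxX := max |(ed.getD s (0, 0)).1 - p.1| st.1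
        let distMaxY := max |(ed.getD s (0, 0)).2 - p.2| st.2.1
        (distMaxX, distMaxY, max st.2.2 (max distMaxX distMaxY)))
      (0, 0, 0)
    secWidth ++ [st.2.2]) []

-- ===== PORT B =====
def sectorWidth_alt (edgeSectors : List (Int × Int × Int)) (ValidPosInSectors : List (Int × List (Int × Int))) : List Int :=
  let ed := PySem.Dict.ofList edgeSectors
  (PySem.Dict.ofList ValidPosInSectors).items.map (fun sp =>
    match sp.2 with
    | [] => 0
    | p :: rest =>
      let e := ed.getD sp.1 (0, 0)
      let xs := (p :: rest).map Prod.fst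
      let ys := (p :: rest).map Prod.snd
      let minX := xs.foldl min p.1
      let maxX := xs.foldl max p.1
      let minY := ys.foldl min p.2
      let maxY := ys.foldl max p.2
      max (max (e.1 - minX) (maxX - e.1)) (max (e.2 - minY) (maxY - e.2)))

-- ===== PRECONDITION & SPEC =====
-- Pre_ excludes exactly the inputs where Python A raises KeyError: a sector of
-- ValidPosInSectors with a nonempty point list whose key is not a key of edgeSectors
-- (edgeSectors[s] is only evaluated inside the loop over that sector's points).
def Pre_sectorWidth (edgeSectors : List (Int × Int × Int)) (ValidPosInSectors : List (Int × List (Int × Int))) : Prop :=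
  ∀ kv ∈ (PySem.Dict.ofList ValidPosInSectors).items, kv.2 ≠ [] → kv.1 ∈ edgeSectors.map Prod.fst
instance (edgeSectors : List (Int × Int × Int)) (ValidPosInSectors : List (Int × List (Int × Int))) : Decidable (Pre_sectorWidth edgeSectors ValidPosInSectors) := by unfold Pre_sectorWidth; infer_instance
def pvWitness_sectorWidth : (List (Int × Int × Int)) × (List (Int × List (Int × Int))) :=
  ([(0, 0, 0), (7, 3, 4)], [(0, [(1, 2), (-2, 1)]), (7, [(3, 9)])])
def Spec_sectorWidth (edgeSectors : List (Int × Int × Int)) (ValidPosInSectors : List (Int × List (Int × Int))) (out : List Int) : Prop := out = sectorWidth_alt edgeSectors ValidPosInSectors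
instance (edgeSectors : List (Int × Int × Int)) (ValidPosInSectors : List (Int × List (Int × Int))) (out : List Int) : Decidable (Spec_sectorWidth edgeSectors ValidPosInSectors out) := by unfold Spec_sectorWidth; infer_instance

-- ===== CLAIM (what is proved, stated in full; the proofs are below) =====
def Claim_equal_sectorWidth : Prop := ∀ (edgeSectors : List (Int × Int × Int)) (ValidPosInSectors : List (Int × List (Int × Int))), Dom_sectorWidth edgeSectors ValidPosInSectors → Pre_sectorWidth edgeSectors ValidPosInSectors → Spec_sectorWidth edgeSectors ValidPosInSectors (sectorWidth edgeSectors ValidPosInSectors)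

-- ===== LEMMAS AND PROOFS =====

-- A's inner loop with three accumulators computes, in its third component, the max of the
-- two per-axis folds (the invariant st = (a, b, max a b) is preserved).
theorem inner_loop_eq {α : Type} (f g : α → Int) (pts : List α) (a b : Int) :
    pts.foldl (fun (st : Int × Int × Int) p =>
        (max (f p) st.1, max (g p) st.2.1,
         max st.2.2 (max (max (f p) st.1) (max (g p) st.2.1)))) (a, b, max a b)
    = (pts.foldl (fun x p => max (f p) x) a,
       pts.foldl (fun y p => max (g p) y) b,
       max (pts.foldl (fun x p => max (f p) x) a) (pts.foldl (fun y p => max (g p) y) b)) := by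
  induction pts generalizing a b with
  | nil => simp
  | cons p rest ih =>
    simp only [List.foldl_cons]
    rw [max_eq_right (max_le_max (le_max_right (f p) a) (le_max_right (g p) b))]
    exact ih _ _

theorem inner_loop_eq0 {α : Type} (f g : α → Int) (pts : List α) :
    (pts.foldl (fun (st : Int × Int × Int) p =>
        (max (f p) st.1, max (g p) st.2.1,
         max st.2.2 (max (max (f p) st.1) (max (g p) st.2.1)))) (0, 0, 0)).2.2
    = max (pts.foldl (fun x p => max x (f p)) 0) (pts.foldl (fun y p => max y (g p)) 0) := by
  have hcomm : ∀ (h : α → Int), (fun (x : Int) p => max (h p) x) = (fun x p => max x (h p)) := by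
    intro h; funext x p; exact max_comm _ _
  have h := inner_loop_eq f g pts 0 0
  rw [show max (0 : Int) 0 = 0 by norm_num] at h
  rw [h, hcomm f, hcomm g]

-- running max of |e - x| from init max(e-a)(b-e) equals the closed form over extrema
theorem fold_abs_acc (e : Int) (l : List Int) (a b : Int) :
    l.foldl (fun m x => max m |e - x|) (max (e - a) (b - e))
    = max (e - l.foldl min a) (l.foldl max b - e) := by
  induction l generalizing a b with
  | nil => rfl
  | cons x rest ih =>
    simp only [List.foldl_cons]
    have h : max (max (e - a) (b - e)) |e - x|
        = max (e - min a x) (max b x - e) := by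
      rcases abs_cases (e - x) with ⟨h1, _⟩ | ⟨h1, _⟩ <;>
        simp only [h1] <;> omega
    rw [h, ih]

-- fold of running abs-max over a nonempty list, started at 0
theorem fold_abs_cons (e a : Int) (rest : List Int) :
    (a :: rest).foldl (fun m x => max m |e - x|) 0
    = max (e - rest.foldl min a) (rest.foldl max a - e) := by
  have h0 : max (0 : Int) |e - a| = max (e - a) (a - e) := by
    rcases abs_cases (e - a) with ⟨h1, _⟩ | ⟨h1, _⟩ <;> simp only [h1] <;> omega
  simpa [List.foldl_cons, h0] using
    (by rw [← fold_abs_acc e rest a a, h0.symm] :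
      rest.foldl (fun m x => max m |e - x|) (max 0 |e - a|)
      = max (e - rest.foldl min a) (rest.foldl max a - e))

theorem sectorWidth_spec : Claim_equal_sectorWidth := by
  intro edgeSectors V _ _
  unfold Spec_sectorWidth sectorWidth sectorWidth_alt
  set ed := PySem.Dict.ofList edgeSectors with hed
  set d := PySem.Dict.ofList V with hd
  rw [PySem.List.foldl_append_singleton_eq_map,
      PySem.Dict.items_eq_map_keys d (PySem.Dict.nodup_keys_ofList V) ([] : List (Int × Int)),
      List.map_map]
  refine List.map_congr_left (fun s _ => ?_)
  simp only [Function.comp]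
  rw [inner_loop_eq0
    (fun p => |(ed.getD s (0, 0)).1 - p.1|)
    (fun p => |(ed.getD s (0, 0)).2 - p.2|) (d.getD s [])]
  cases hpts : d.getD s [] with
  | nil => simp
  | cons p rest =>
    simp only []
    have hx := fold_abs_cons (ed.getD s (0, 0)).1 p.1 (rest.map Prod.fst)
    have hy := fold_abs_cons (ed.getD s (0, 0)).2 p.2 (rest.map Prod.snd)
    rw [show ((p :: rest).foldl (fun x q => max x |(ed.getD s (0,0)).1 - q.1|) 0)
        = (p.1 :: rest.map Prod.fst).foldl (fun m x => max m |(ed.getD s (0,0)).1 - x|) 0 by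
        simp [List.foldl_map],
      show ((p :: rest).foldl (fun y q => max y |(ed.getD s (0,0)).2 - q.2|) 0)
        = (p.2 :: rest.map Prod.snd).foldl (fun m x => max m |(ed.getD s (0,0)).2 - x|) 0 by
        simp [List.foldl_map],
      hx, hy]
    simp [List.foldl_map]
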